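-- pv_equiv track=rewrite | github.com/TobiasBengtsson/AdventOfCode2020 | day14/day14pt2.py | intersect_list
-- ===== SOURCE A (Python) =====
-- def intersect(address_set_1, address_set_2):
--     # The memory addresses are actually sets of addresses and we
--     # can implement an efficient intersect function.
--     # Ex. 1001X10X1
--     #     10X1XX0XX
--     #     ---------
--     #     1001X10X1
--     if not address_set_1 or not address_set_2:
--         return None
--     intersection = ''
--     for a1, a2 in zip(address_set_1, address_set_2):
--         if a1 == a2:
--             intersection += a1
--         elif a1 == 'X':
--             intersection += a2
--         elif a2 == 'X':
--             intersection += a1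
--         else:
--             # a1 and a2 are different numbers
--             return None
--     return intersection
--
-- def intersect_list(address_sets):
--     # Useful for intersecting 3 or more sets
--     if len(address_sets) > 2:
--         return intersect(address_sets[0], intersect_list(address_sets[1:]))
--     elif len(address_sets) == 2:
--         return intersect(address_sets[0], address_sets[1])
--     elif address_sets:
--         return address_sets[0]
--     else:
--         return None
-- ===== SOURCE B (Python) =====
-- def _meet(a, b):
--     if a == b:
--         return a
--     if a == 'X':
--         return b
--     if b == 'X':
--         return a
--     return None
--
--
-- def intersect_list(address_sets):
--     if not address_sets:
--         return None
--     acc = address_sets[-1]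
--     for s in reversed(address_sets[:-1]):
--         if not s or not acc:
--             return None
--         chars = [_meet(x, y) for x, y in zip(s, acc)]
--         if None in chars:
--             return None
--         acc = ''.join(chars)
--     return acc
-- ===== Notes on version B (the rewrite author's own statement) =====
-- stated objective: faster
-- what changed: Replaces the length-cased right recursion (which copies the list slice address_sets[1:] at every call and recurses n deep) and the accumulator-with-early-return string builder by one iterative right-to-left loop whose per-pair step maps a character-level meet over the zipped columns and joins.
import Mathlib
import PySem

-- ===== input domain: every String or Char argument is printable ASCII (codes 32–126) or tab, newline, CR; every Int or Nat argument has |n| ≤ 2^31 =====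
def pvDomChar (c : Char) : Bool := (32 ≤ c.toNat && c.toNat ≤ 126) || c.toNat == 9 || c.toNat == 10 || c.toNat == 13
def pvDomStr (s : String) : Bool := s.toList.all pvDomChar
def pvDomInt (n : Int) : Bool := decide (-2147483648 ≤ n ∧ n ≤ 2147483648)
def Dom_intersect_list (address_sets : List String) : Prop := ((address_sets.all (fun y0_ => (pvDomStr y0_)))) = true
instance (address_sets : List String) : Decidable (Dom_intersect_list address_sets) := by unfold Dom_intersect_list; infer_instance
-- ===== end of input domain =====

-- B replaces A's length-cased slicing recursion and accumulator loop by an iterative right-to-left fold whose pairwise step is a character-level meet mapped over the zipped columns; return-value equivalence proved on all inputs.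


-- ===== PORT A =====
-- the character loop of `intersect`: for a1, a2 in zip(...), building `intersection` by +=
def intersectGo : List (Char × Char) → String → Option String
  | [], acc => some acc
  | (a1, a2) :: rest, acc =>
    if a1 = a2 then intersectGo rest (acc.push a1)
    else if a1 = 'X' then intersectGo rest (acc.push a2)
    else if a2 = 'X' then intersectGo rest (acc.push a1)
    else none

-- `intersect`: arguments are str-or-None (Python falsy check covers both None and "")
def intersect2 (s1 s2 : Option String) : Option String :=
  match s1, s2 with
  | some a, some b =>
    if a = "" ∨ b = "" then none
    else intersectGo (a.toList.zip b.toList) ""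
  | _, _ => none

def intersect_list (address_sets : List String) : Option String :=
  if 2 < address_sets.length then
    intersect2 address_sets[0]? (intersect_list (address_sets.drop 1))
  else if address_sets.length = 2 then
    intersect2 address_sets[0]? address_sets[1]?
  else
    match address_sets with
    | [] => none
    | a :: _ => some a
  termination_by address_sets.length
  decreasing_by simp; omega

-- ===== PORT B =====
-- _meet: intersection of two mask characters, None on conflict
def pvMeet (a b : Char) : Option Char :=
  if a = b then some a
  else if a = 'X' then some b
  else if b = 'X' then some a
  else none

-- the loop body of B: acc carries the running intersection; each step maps _meet
-- over the zipped columns and joins, returning early on an empty string or a conflict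
def altGo : List String → String → Option String
  | [], acc => some acc
  | s :: rest, acc =>
    if s = "" ∨ acc = "" then none
    else
      match (s.toList.zip acc.toList).mapM (fun p => pvMeet p.1 p.2) with
      | none => none
      | some cs => altGo rest (String.ofList cs)

-- if not address_sets: None; acc = address_sets[-1]; loop over reversed(address_sets[:-1])
def intersect_list_alt (address_sets : List String) : Option String :=
  match address_sets.getLast? with
  | none => none
  | some last => altGo address_sets.dropLast.reverse last

-- ===== PRECONDITION & SPEC =====
def Spec_intersect_list (address_sets : List String) (out : Option String) : Prop := out = intersect_list_alt address_sets
instance (address_sets : List String) (out : Option String) : Decidable (Spec_intersect_list address_sets out) := by unfold Spec_intersect_list; infer_instance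

-- ===== CLAIM (what is proved, stated in full; the proofs are below) =====
def Claim_equal_intersect_list : Prop := ∀ (address_sets : List String), Dom_intersect_list address_sets → Spec_intersect_list address_sets (intersect_list address_sets)

-- ===== LEMMAS AND PROOFS =====
theorem push_append (acc : String) (c : Char) (cs : List Char) :
    acc.push c ++ String.ofList cs = acc ++ String.ofList (c :: cs) := by
  apply String.toList_injective
  simp

-- A's accumulator loop computes the mapM of B's character meet, appended to the accumulator
theorem intersectGo_eq_mapM (ps : List (Char × Char)) (acc : String) :
    intersectGo ps acc =
      (ps.mapM (fun p => pvMeet p.1 p.2)).map (fun cs => acc ++ String.ofList cs) := by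
  induction ps generalizing acc with
  | nil =>
    simp only [List.mapM_nil, intersectGo, pure, Option.map_some]
    congr 1
    apply String.toList_injective
    simp
  | cons p t ih =>
    obtain ⟨a1, a2⟩ := p
    cases hm : t.mapM (fun p => pvMeet p.1 p.2) with
    | none =>
      simp only [intersectGo, List.mapM_cons, ih, hm]
      simp only [pvMeet]
      split_ifs <;> simp
    | some cs =>
      simp only [intersectGo, List.mapM_cons, ih, hm]
      simp only [pvMeet]
      split_ifs <;> simp [push_append]

-- each step of B's loop is A's pairwise intersect
theorem altGo_step (s acc : String) :
    (if s = "" ∨ acc = "" then none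
     else match (s.toList.zip acc.toList).mapM (fun p => pvMeet p.1 p.2) with
       | none => none
       | some cs => some (String.ofList cs)) = intersect2 (some s) (some acc) := by
  simp only [intersect2]
  split_ifs with h
  · rfl
  · rw [intersectGo_eq_mapM]
    cases (s.toList.zip acc.toList).mapM (fun p => pvMeet p.1 p.2) with
    | none => rfl
    | some cs =>
      simp only [Option.map_some]
      congr 1

-- once the accumulator is None, the fold stays None
theorem foldl_none (rest : List String) :
    rest.foldl (fun o s => intersect2 (some s) o) none = none := by
  induction rest with
  | nil => rfl
  | cons s t ih => simpa [intersect2] using ih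

-- B's loop is the right-to-left fold of A's pairwise intersect
theorem altGo_eq_foldl (rest : List String) (acc : String) :
    altGo rest acc = rest.foldl (fun o s => intersect2 (some s) o) (some acc) := by
  induction rest generalizing acc with
  | nil => rfl
  | cons s t ih =>
    rw [List.foldl_cons, ← altGo_step]
    simp only [altGo]
    split_ifs with h
    · exact (foldl_none t).symm
    · cases (s.toList.zip acc.toList).mapM (fun p => pvMeet p.1 p.2) with
      | none => exact (foldl_none t).symm
      | some cs => exact ih (String.ofList cs)

-- B written as that fold over the reversed prefix
theorem alt_eq_foldl (a : String) (l : List String) :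
    intersect_list_alt (a :: l) =
      ((a :: l).dropLast.reverse).foldl (fun o s => intersect2 (some s) o)
        ((a :: l).getLast?) := by
  simp only [intersect_list_alt]
  cases h : (a :: l).getLast? with
  | none => simp [List.getLast?_eq_none_iff] at h
  | some last => exact altGo_eq_foldl _ _

-- A on a nonempty tail unfolds to one intersect of the head with the recursive result
theorem intersect_list_cons (a : String) (rest : List String) (h : rest ≠ []) :
    intersect_list (a :: rest) = intersect2 (some a) (intersect_list rest) := by
  match rest, h with
  | [b], _ =>
    rw [intersect_list, intersect_list]
    simp
  | b :: c :: t, _ =>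
    rw [intersect_list]
    simp

-- B on a nonempty tail peels the head off the reversed loop
theorem intersect_list_alt_cons (a : String) (rest : List String) (h : rest ≠ []) :
    intersect_list_alt (a :: rest) = intersect2 (some a) (intersect_list_alt rest) := by
  match rest, h with
  | b :: t, _ =>
    rw [alt_eq_foldl, alt_eq_foldl]
    simp [List.dropLast_cons_of_ne_nil (l := b :: t) (by simp), List.foldl_append,
      List.getLast?_cons_cons]

theorem intersect_list_eq_alt (address_sets : List String) :
    intersect_list address_sets = intersect_list_alt address_sets := by
  induction address_sets with
  | nil =>
    rw [intersect_list]
    simp [intersect_list_alt]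
  | cons a rest ih =>
    cases hr : rest with
    | nil =>
      rw [intersect_list]
      simp [intersect_list_alt, altGo]
    | cons b t =>
      rw [← hr, intersect_list_cons a rest (by simp [hr]),
        intersect_list_alt_cons a rest (by simp [hr]), ih]

-- ===== VERDICT (by name: the statement is the Claim_ definition above) =====
theorem intersect_list_spec : Claim_equal_intersect_list := by
  intro address_sets _
  exact intersect_list_eq_alt address_sets
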